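-- pv_equiv track=rewrite | github.com/iej0710/practice_for_coding_test | programmers/best_set.py | solution
-- ===== SOURCE A (Python) =====
-- def solution(n, s):
--     answer = []
--     if s // n == 0:
--         answer = [-1]
--     elif s % n == 0:
--         answer = [s // n] * n
--     else:
--         k = s // n
--         answer = [s // n] * n
--         for i in range(s % n):
--             answer[-1 - i] += 1
--     return answer
-- ===== SOURCE B (Python) =====
-- def solution(n, s):
--     if s // n == 0:
--         return [-1]
--     ans = []
--     k, rem = n, s
--     while k > 0:
--         # give the next slot the floor-average of what remains
--         v = rem // k
--         ans.append(v)
--         rem -= v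
--         k -= 1
--     return ans
-- ===== Notes on version B (the rewrite author's own statement) =====
-- stated objective: alternative
-- what changed: B replaces A's divmod-based 'fill a flat list then bump its last r entries' with a greedy recursion that never computes s % n: each slot takes the floor of the remaining sum divided by the remaining slot count and the recursion continues on the reduced sum, which provably yields the same balanced sequence.
import Mathlib
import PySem

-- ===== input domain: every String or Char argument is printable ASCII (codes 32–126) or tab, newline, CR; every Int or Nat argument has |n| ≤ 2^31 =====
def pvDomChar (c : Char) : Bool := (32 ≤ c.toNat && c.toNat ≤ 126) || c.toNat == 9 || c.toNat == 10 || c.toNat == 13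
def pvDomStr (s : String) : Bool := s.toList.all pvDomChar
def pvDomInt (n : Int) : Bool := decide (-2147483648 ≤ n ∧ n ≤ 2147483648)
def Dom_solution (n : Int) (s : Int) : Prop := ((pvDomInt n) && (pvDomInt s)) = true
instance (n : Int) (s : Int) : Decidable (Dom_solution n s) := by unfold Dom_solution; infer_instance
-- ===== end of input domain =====

-- B replaces A's divmod-and-bump construction with a greedy recursion (each slot takes the
-- floor of the remaining sum over the remaining slot count); objective: alternative.

-- ===== PORT A =====
def solution (n : Int) (s : Int) : List Int :=
  if PySem.Int.floordiv s n = 0 then [-1]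
  else if PySem.Int.mod s n = 0 then PySem.List.pyRepeat [PySem.Int.floordiv s n] n
  else
    (PySem.List.pyRange 0 (PySem.Int.mod s n) 1).foldl
      (fun acc i => PySem.List.pySetD acc (-1 - i) (PySem.List.pyGetD acc (-1 - i) 0 + 1))
      (PySem.List.pyRepeat [PySem.Int.floordiv s n] n)

-- ===== PORT B =====
-- Source B's while loop: each slot takes the floor-average of the remaining sum, appended to ans
def pvDistribLoop (k : Int) (rem : Int) (ans : List Int) : List Int :=
  if h : 0 < k then
    let v := PySem.Int.floordiv rem k
    pvDistribLoop (k - 1) (rem - v) (ans ++ [v])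
  else ans
termination_by k.toNat
decreasing_by omega

def solution_alt (n : Int) (s : Int) : List Int :=
  if PySem.Int.floordiv s n = 0 then [-1]
  else pvDistribLoop n s []

-- ===== PRECONDITION & SPEC =====
-- Python raises ZeroDivisionError at s // n when n = 0; excluded.
def Pre_solution (n : Int) (s : Int) : Prop := n ≠ 0
instance (n : Int) (s : Int) : Decidable (Pre_solution n s) := by unfold Pre_solution; infer_instance
def pvWitness_solution : Int × Int := (3, 7)
def Spec_solution (n : Int) (s : Int) (out : List Int) : Prop := out = solution_alt n s
instance (n : Int) (s : Int) (out : List Int) : Decidable (Spec_solution n s out) := by unfold Spec_solution; infer_instance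

-- ===== CLAIM (what is proved, stated in full; the proofs are below) =====
def Claim_equal_solution : Prop := ∀ (n : Int) (s : Int), Dom_solution n s → Pre_solution n s → Spec_solution n s (solution n s)

-- ===== LEMMAS AND PROOFS =====

-- Python's xs[-k] = v for 0 < k ≤ len xs, as a set at len - k.
theorem pySetD_neg_natCast (xs : List Int) (k : Nat) (v : Int) (h1 : 0 < k) (h2 : k ≤ xs.length) :
    PySem.List.pySetD xs (-(k:Int)) v = xs.set (xs.length - k) v := by
  unfold PySem.List.pySetD PySem.List.pySet? PySem.List.pyIdx?
  rw [if_neg (by omega), if_pos (by omega)]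
  simp

-- Python's xs[-k] read for 0 < k ≤ len xs.
theorem pyGetD_neg_natCast (xs : List Int) (k : Nat) (d : Int) (h1 : 0 < k) (h2 : k ≤ xs.length) :
    PySem.List.pyGetD xs (-(k:Int)) d = xs.getD (xs.length - k) d := by
  unfold PySem.List.pyGetD PySem.List.pyGet? PySem.List.pyIdx?
  rw [if_neg (by omega), if_pos (by omega)]
  simp [List.getD]

-- A's increment loop on a uniform list yields two uniform blocks.
theorem loop_replicate (N : Nat) (base : Int) (j : Nat) (hj : j ≤ N) :
    (PySem.List.pyRange 0 (j:Int) 1).foldl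
      (fun acc i => PySem.List.pySetD acc (-1 - i) (PySem.List.pyGetD acc (-1 - i) 0 + 1))
      (List.replicate N base)
    = List.replicate (N - j) base ++ List.replicate j (base + 1) := by
  induction j with
  | zero => simp [PySem.List.pyRange_one_eq_nil (by omega : (0:Int) ≤ 0)]
  | succ j ih =>
    rw [show ((j+1:Nat):Int) = (j:Int) + 1 by push_cast; ring,
        PySem.List.pyRange_one_succ_right (by positivity), List.foldl_append, ih (by omega)]
    simp only [List.foldl_cons, List.foldl_nil]
    have hidx : (-1 - (j:Int)) = -(((j+1:Nat)):Int) := by push_cast; ring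
    have hlen : (List.replicate (N - j) base ++ List.replicate j (base + 1)).length = N := by
      simp; omega
    rw [hidx, pyGetD_neg_natCast _ _ _ (by omega) (by omega),
        pySetD_neg_natCast _ _ _ (by omega) (by omega), hlen]
    have h1 : N - (j+1) < N - j := by omega
    have hget : (List.replicate (N - j) base ++ List.replicate j (base + 1)).getD (N - (j+1)) 0 = base := by
      rw [List.getD_eq_getElem?_getD, List.getElem?_append_left (by simp; omega)]
      simp [h1]
    rw [hget]
    rw [List.set_append_left _ _ (by simp; omega)]
    have : List.replicate (N - j) base = List.replicate (N - (j+1)) base ++ [base] := by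
      rw [← List.replicate_succ']
      congr 1
      omega
    rw [this, List.set_append_right _ _ (by simp)]
    simp only [List.length_replicate, Nat.sub_self, List.set_cons_zero, List.append_assoc,
      List.singleton_append, ← List.replicate_succ]

-- proof-side cons-form of the greedy loop
def pvDistribute (k : Int) (rem : Int) : List Int :=
  if 0 < k then
    let v := PySem.Int.floordiv rem k
    v :: pvDistribute (k - 1) (rem - v)
  else []
termination_by k.toNat
decreasing_by omega

-- the accumulator loop is the cons-form recursion appended to ans.
theorem distribLoop_eq (K : Nat) (k rem : Int) (ans : List Int) (hk : k.toNat = K) :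
    pvDistribLoop k rem ans = ans ++ pvDistribute k rem := by
  induction K generalizing k rem ans with
  | zero =>
    rw [pvDistribLoop, dif_neg (by omega), pvDistribute, if_neg (by omega)]
    simp
  | succ K ih =>
    rw [pvDistribLoop, dif_pos (by omega), pvDistribute, if_pos (by omega)]
    rw [ih (k - 1) _ _ (by omega)]
    simp

-- floor((q*k + t)/k) = q for 0 ≤ t < k.
theorem floordiv_of_bounds (q t k : Int) (h0 : 0 ≤ t) (h1 : t < k) :
    PySem.Int.floordiv (q * k + t) k = q := by
  rw [PySem.Int.floordiv_eq_iff_of_pos (by omega)]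
  constructor <;> nlinarith

-- exact division: the greedy recursion hands out c every time.
theorem distribute_exact (K : Nat) (c : Int) :
    pvDistribute (K : Int) (c * K) = List.replicate K c := by
  induction K with
  | zero => simp [pvDistribute]
  | succ K ih =>
    rw [pvDistribute, if_pos (by push_cast; omega)]
    have hv : PySem.Int.floordiv (c * ((K+1:Nat):Int)) ((K+1:Nat):Int) = c := by
      have := floordiv_of_bounds c 0 ((K+1:Nat):Int) le_rfl (by push_cast; omega)
      simpa using this
    simp only [hv]
    have e1 : ((K+1:Nat):Int) - 1 = (K:Int) := by push_cast; ring
    have e2 : c * ((K+1:Nat):Int) - c = c * (K:Int) := by push_cast; ring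
    rw [e1, e2, ih, List.replicate_succ]

-- the greedy recursion on q*K + t (0 ≤ t < K) yields the two balanced blocks.
theorem distribute_blocks (K : Nat) (q t : Int) (h0 : 0 ≤ t) (h1 : t < K) :
    pvDistribute (K : Int) (q * K + t)
      = List.replicate (K - t.toNat) q ++ List.replicate t.toNat (q + 1) := by
  induction K generalizing q with
  | zero => omega
  | succ K ih =>
    rw [pvDistribute, if_pos (by push_cast; omega)]
    have hv : PySem.Int.floordiv (q * ((K+1:Nat):Int) + t) ((K+1:Nat):Int) = q :=
      floordiv_of_bounds q t _ h0 (by exact_mod_cast h1)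
    simp only [hv]
    have e1 : ((K+1:Nat):Int) - 1 = (K:Int) := by push_cast; ring
    have e2 : q * ((K+1:Nat):Int) + t - q = q * (K:Int) + t := by push_cast; ring
    rw [e1, e2]
    by_cases ht : t < K
    · rw [ih q ht]
      have : K + 1 - t.toNat = (K - t.toNat) + 1 := by omega
      rw [this, List.replicate_succ, List.cons_append]
    · -- t = K: remaining sum is (q+1)*K, distributed exactly
      have htK : t = (K : Int) := by omega
      have : q * (K:Int) + t = (q + 1) * (K:Int) := by rw [htK]; ring
      rw [this, distribute_exact K (q+1)]
      have e3 : K + 1 - t.toNat = 1 := by omega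
      have e4 : t.toNat = K := by omega
      rw [e3, e4]
      simp

-- ===== VERDICT (by name: the statement is the Claim_ definition above) =====
theorem solution_spec : Claim_equal_solution := by
  intro n s _ hn
  unfold Spec_solution solution solution_alt
  by_cases hq : PySem.Int.floordiv s n = 0
  · simp [hq]
  · rw [if_neg hq, if_neg hq]
    rcases lt_or_gt_of_ne hn with hneg | hpos
    · -- n < 0 : both sides are []
      have hB : pvDistribLoop n s [] = [] := by
        rw [distribLoop_eq n.toNat n s [] rfl, pvDistribute, if_neg (by omega)]
        simp
      have e1 : n.toNat = 0 := by omega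
      by_cases hr : PySem.Int.mod s n = 0
      · rw [if_pos hr, hB]
        simp [PySem.List.pyRepeat_singleton, e1]
      · rw [if_neg hr, hB]
        have hb := PySem.Int.mod_neg_bounds (a := s) (b := n) hneg
        have hr0 : PySem.Int.mod s n < 0 := lt_of_le_of_ne hb.2 hr
        rw [PySem.List.pyRange_one_eq_nil (by omega)]
        simp [PySem.List.pyRepeat_singleton, e1]
    · -- n > 0
      have h0 : 0 ≤ PySem.Int.mod s n := PySem.Int.mod_nonneg (a := s) hpos
      have h1 : PySem.Int.mod s n < n := PySem.Int.mod_lt (a := s) hpos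
      have hs : s = PySem.Int.floordiv s n * n + PySem.Int.mod s n :=
        (PySem.Int.floordiv_mul_add_mod s n).symm
      have hcast : ((n.toNat : Nat) : Int) = n := by omega
      have hB := distribute_blocks n.toNat (PySem.Int.floordiv s n) (PySem.Int.mod s n)
        h0 (by rw [hcast]; exact h1)
      rw [hcast, ← hs] at hB
      rw [distribLoop_eq n.toNat n s [] rfl, List.nil_append, hB]
      by_cases hr : PySem.Int.mod s n = 0
      · rw [if_pos hr, hr]
        simp [PySem.List.pyRepeat_singleton]
      · rw [if_neg hr]
        have hloop := loop_replicate n.toNat (PySem.Int.floordiv s n) (PySem.Int.mod s n).toNat (by omega)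
        rw [show (((PySem.Int.mod s n).toNat : Nat) : Int) = PySem.Int.mod s n by omega] at hloop
        rw [PySem.List.pyRepeat_singleton, hloop]
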